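-- pv_equiv track=rewrite | github.com/kjb4494/baekjoon | 2023/Silver/1652.py | solve
-- ===== SOURCE A (Python) =====
-- def solve(room):
--     result = [0, 0]
--     room_size = len(room)
--     for i in range(room_size):
--         count = 0
--         for j in range(room_size):
--             if room[i][j] == 'X':
--                 if count >= 2:
--                     result[0] += 1
--                 count = 0
--             else:
--                 count += 1
--         if count >= 2:
--             result[0] += 1
--
--     for j in range(room_size):
--         count = 0
--         for i in range(room_size):
--             if room[i][j] == 'X':
--                 if count >= 2:
--                     result[1] += 1
--                 count = 0
--             else:
--                 count += 1
--         if count >= 2: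
--             result[1] += 1
--
--     return " ".join(map(str, result))
-- ===== SOURCE B (Python) =====
-- def solve(room):
--     n = len(room)
--     grid = [r[:n] for r in room]
--
--     def free_runs(line):
--         return sum(1 for seg in line.split('X') if len(seg) >= 2)
--
--     horiz = sum(free_runs(r) for r in grid)
--     vert = sum(free_runs(''.join(r[j] for r in grid)) for j in range(n))
--     return f"{horiz} {vert}"
-- ===== Notes on version B (the rewrite author's own statement) =====
-- stated objective: simpler
-- what changed: Replaces A's running-count state machine (reset on 'X', flush at row/column end) by materialising each line's maximal free segments with str.split('X') and counting those of length >= 2; columns are built once as strings.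
import Mathlib
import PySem

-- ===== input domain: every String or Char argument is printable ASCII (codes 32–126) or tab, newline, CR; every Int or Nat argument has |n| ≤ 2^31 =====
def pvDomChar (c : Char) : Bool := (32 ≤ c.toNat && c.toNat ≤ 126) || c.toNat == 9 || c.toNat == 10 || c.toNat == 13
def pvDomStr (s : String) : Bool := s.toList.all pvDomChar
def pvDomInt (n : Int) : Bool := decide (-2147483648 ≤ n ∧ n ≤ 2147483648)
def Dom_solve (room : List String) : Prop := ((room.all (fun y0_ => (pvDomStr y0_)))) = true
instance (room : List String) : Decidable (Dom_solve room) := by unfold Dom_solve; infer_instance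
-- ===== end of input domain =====

-- B replaces A's running-count state machine by split-on-'X'-then-filter over rows and column strings; objective: simpler.


-- ===== PORT A =====
-- A's result list [r0, r1] is carried as the pair (result.1, result.2); the running
-- count and the state-machine updates are transcribed step for step.
def solve (room : List String) : String :=
  let n : Int := room.length
  let result : Int × Int := (0, 0)
  let result :=
    (PySem.List.pyRange 0 n 1).foldl (fun result i =>
      let p :=
        (PySem.List.pyRange 0 n 1).foldl (fun (p : Int × Int) j =>
          if PySem.List.pyGetD (PySem.List.pyGetD room i "").toList j ' ' == 'X' then
            (p.1 + (if p.2 ≥ 2 then 1 else 0), 0)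
          else
            (p.1, p.2 + 1)) (result.1, 0)
      (p.1 + (if p.2 ≥ 2 then 1 else 0), result.2)) result
  let result :=
    (PySem.List.pyRange 0 n 1).foldl (fun result j =>
      let p :=
        (PySem.List.pyRange 0 n 1).foldl (fun (p : Int × Int) i =>
          if PySem.List.pyGetD (PySem.List.pyGetD room i "").toList j ' ' == 'X' then
            (p.1 + (if p.2 ≥ 2 then 1 else 0), 0)
          else
            (p.1, p.2 + 1)) (result.2, 0)
      (result.1, p.1 + (if p.2 ≥ 2 then 1 else 0))) result
  PySem.Str.join " " [PySem.Int.toStr result.1, PySem.Int.toStr result.2]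

-- ===== PORT B =====
-- free_runs(line) = sum(1 for seg in line.split('X') if len(seg) >= 2)
def freeRuns (line : List Char) : Int :=
  ((PySem.Chars.splitOn line ['X']).countP (fun seg => 2 ≤ seg.length) : Nat)

def solve_alt (room : List String) : String :=
  let n := room.length
  let grid := room.map (fun r => r.toList.take n)   -- r[:n]; exact since n = len(room) ≥ 0
  let horiz := (grid.map freeRuns).sum
  let vert := ((List.range n).map (fun j : Nat =>
      freeRuns (grid.map (fun r => PySem.List.pyGetD r (j : Int) ' ')))).sum
  String.ofList (PySem.Int.toChars horiz ++ ' ' :: PySem.Int.toChars vert)   -- f"{horiz} {vert}"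

-- ===== PRECONDITION & SPEC =====
-- Pre_ excludes exactly the ragged inputs on which A raises IndexError: some row
-- shorter than the number of rows (room[i][j] out of range).
def Pre_solve (room : List String) : Prop := ∀ s ∈ room, room.length ≤ s.toList.length
instance (room : List String) : Decidable (Pre_solve room) := by unfold Pre_solve; infer_instance
def pvWitness_solve : List String := ["..", "X."]
def Spec_solve (room : List String) (out : String) : Prop := out = solve_alt room
instance (room : List String) (out : String) : Decidable (Spec_solve room out) := by unfold Spec_solve; infer_instance

-- ===== CLAIM (what is proved, stated in full; the proofs are below) =====
def Claim_equal_solve : Prop := ∀ (room : List String), Dom_solve room → Pre_solve room → Spec_solve room (solve room)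

-- ===== LEMMAS AND PROOFS =====

-- reference split: maximal 'X'-free segments, accumulating the current segment
def mySplit (cur : List Char) : List Char → List (List Char)
  | [] => [cur]
  | c :: t => if c = 'X' then cur :: mySplit [] t else mySplit (cur ++ [c]) t

theorem splitOn_go_spec (fuel : Nat) :
    ∀ (l cur : List Char) (acc : List (List Char)), l.length < fuel →
      PySem.Chars.splitOn.go ['X'] fuel l cur acc =
        acc.reverse ++ mySplit cur.reverse l := by
  induction fuel with
  | zero => intro l cur acc h; omega
  | succ f ih =>
    intro l cur acc h
    cases l with
    | nil => simp [PySem.Chars.splitOn.go, mySplit]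
    | cons c t =>
      by_cases hc : c = 'X'
      · subst hc
        rw [show PySem.Chars.splitOn.go ['X'] (f+1) ('X' :: t) cur acc =
              PySem.Chars.splitOn.go ['X'] f t [] (cur.reverse :: acc) from by
            simp [PySem.Chars.splitOn.go, List.isPrefixOf]]
        rw [ih t [] (cur.reverse :: acc) (by simpa using Nat.lt_of_succ_lt_succ h)]
        simp [mySplit]
      · rw [show PySem.Chars.splitOn.go ['X'] (f+1) (c :: t) cur acc =
              PySem.Chars.splitOn.go ['X'] f t (c :: cur) acc from by
            simp only [PySem.Chars.splitOn.go, List.isPrefixOf]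
            rw [if_neg (by simp [Ne.symm hc])]]
        rw [ih t (c :: cur) acc (by simpa using Nat.lt_of_succ_lt_succ h)]
        simp [mySplit, hc]

theorem splitOn_eq_mySplit (l : List Char) :
    PySem.Chars.splitOn l ['X'] = mySplit [] l := by
  rw [PySem.Chars.splitOn, splitOn_go_spec (l.length + 1) l [] [] (by omega)]
  simp

def countBig (ss : List (List Char)) : Int := (ss.countP (fun seg => 2 ≤ seg.length) : Nat)

-- the state machine of A's inner loop, over an explicit char list
def stepA (p : Int × Int) (c : Char) : Int × Int :=
  if c == 'X' then (p.1 + (if p.2 ≥ 2 then 1 else 0), 0) else (p.1, p.2 + 1)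

theorem machine_eq (l : List Char) : ∀ (r : Int) (cur : List Char),
    (let p := l.foldl stepA (r, (cur.length : Int));
     p.1 + (if p.2 ≥ 2 then 1 else 0)) = r + countBig (mySplit cur l) := by
  induction l with
  | nil =>
    intro r cur
    simp only [List.foldl, mySplit, countBig, List.countP, List.countP.go]
    by_cases h : 2 ≤ cur.length
    · simp [h, show (2:Int) ≤ (cur.length : Int) from by exact_mod_cast h]
    · have : ¬ ((cur.length : Int) ≥ 2) := by exact_mod_cast h
      simp [h, this]
  | cons c t ih =>
    intro r cur
    by_cases hc : c = 'X'
    · subst hc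
      have h0 : stepA (r, (cur.length : Int)) 'X' =
          (r + (if 2 ≤ cur.length then 1 else 0), ((([] : List Char)).length : Int)) := by
        simp only [stepA]
        by_cases h : 2 ≤ cur.length
        · simp [h, show ((cur.length : Int) ≥ 2) from by exact_mod_cast h]
        · have : ¬ ((cur.length : Int) ≥ 2) := by exact_mod_cast h
          simp [h, this]
      simp only [List.foldl, h0, ih]
      simp only [mySplit, countBig]
      by_cases h : 2 ≤ cur.length <;> simp [h] <;> push_cast <;> ring
    · have h0 : stepA (r, (cur.length : Int)) c = (r, ((cur ++ [c]).length : Int)) := by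
        simp [stepA, hc]
        try push_cast; ring
      simp only [List.foldl, h0, ih]
      simp [mySplit, hc]

-- folding over range-indexed getD = folding over the taken prefix
theorem foldl_range_getD {α β : Type} (xs : List α) (d : α) (f : β → α → β) :
    ∀ (n : Nat), n ≤ xs.length → ∀ (init : β),
      (PySem.List.pyRange 0 (n : Int) 1).foldl (fun b j => f b (PySem.List.pyGetD xs j d)) init
        = (xs.take n).foldl f init := by
  intro n
  induction n with
  | zero => intro _ init; simp [PySem.List.pyRange_one_eq_nil]
  | succ m ih =>
    intro h init
    have hcast : ((m + 1 : Nat) : Int) = (m : Int) + 1 := by push_cast; ring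
    have hsplit : PySem.List.pyRange 0 ((m + 1 : Nat) : Int) 1 =
        PySem.List.pyRange 0 (m : Int) 1 ++ [(m : Int)] := by
      have hlast : PySem.List.pyRange (m : Int) ((m : Int) + 1) 1 = [(m : Int)] := by
        rw [PySem.List.pyRange_one_cons (by omega),
            PySem.List.pyRange_one_eq_nil (by omega)]
      rw [hcast,
          PySem.List.pyRange_one_append 0 (m : Int) ((m : Int) + 1)
            (by exact_mod_cast Int.natCast_nonneg m) (by omega),
          hlast]
    rw [hsplit, List.foldl_append, ih (by omega)]
    have hm : m < xs.length := by omega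
    have htake : xs.take (m + 1) = xs.take m ++ [xs[m]] := by
      rw [List.take_succ]
      simp [List.getElem?_eq_getElem hm]
    rw [htake, List.foldl_append]
    simp [PySem.List.pyGetD_natCast, List.getD_eq_getElem?_getD, List.getElem?_eq_getElem hm]

theorem pair_foldl_fst {α : Type} (xs : List α) (g : Int → α → Int) :
    ∀ (a b : Int),
      xs.foldl (fun (p : Int × Int) x => (g p.1 x, p.2)) (a, b) = (xs.foldl g a, b) := by
  induction xs with
  | nil => intro a b; rfl
  | cons x t ih => intro a b; simp [List.foldl, ih]

theorem pair_foldl_snd {α : Type} (xs : List α) (g : Int → α → Int) :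
    ∀ (a b : Int),
      xs.foldl (fun (p : Int × Int) x => (p.1, g p.2 x)) (a, b) = (a, xs.foldl g b) := by
  induction xs with
  | nil => intro a b; rfl
  | cons x t ih => intro a b; simp [List.foldl, ih]

-- per-line value: running the machine over a full line and flushing = freeRuns of that line
theorem line_eq (l : List Char) (r : Int) :
    (let p := l.foldl stepA (r, 0);
     p.1 + (if p.2 ≥ 2 then 1 else 0)) = r + freeRuns l := by
  have := machine_eq l r []
  simpa [freeRuns, countBig, splitOn_eq_mySplit] using this

theorem getD_take {α : Type} (xs : List α) (n k : Nat) (d : α) (hk : k < n) :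
    (xs.take n).getD k d = xs.getD k d := by
  simp [List.getD_eq_getElem?_getD, List.getElem?_take, hk]

theorem solve_eq_alt (room : List String) (hpre : Pre_solve room) :
    solve room = solve_alt room := by
  have hrowlen : ∀ (k : Nat), k < room.length →
      room.length ≤ ((room.getD k "").toList).length := by
    intro k hk
    have : room.getD k "" ∈ room := by
      rw [List.getD_eq_getElem?_getD, List.getElem?_eq_getElem hk]
      exact List.getElem_mem hk
    exact hpre _ this
  -- the row pass of A
  have hrow :
      (PySem.List.pyRange 0 (room.length : Int) 1).foldl (fun (result : Int × Int) i =>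
        let p :=
          (PySem.List.pyRange 0 (room.length : Int) 1).foldl (fun (p : Int × Int) j =>
            if PySem.List.pyGetD (PySem.List.pyGetD room i "").toList j ' ' == 'X' then
              (p.1 + (if p.2 ≥ 2 then 1 else 0), 0)
            else
              (p.1, p.2 + 1)) (result.1, 0)
        (p.1 + (if p.2 ≥ 2 then 1 else 0), result.2)) ((0 : Int), (0 : Int))
      = ((room.map (fun r => freeRuns (r.toList.take room.length))).sum, 0) := by
    rw [PySem.List.foldl_congr_mem _ _
        (fun (result : Int × Int) i =>
          (result.1 + freeRuns ((PySem.List.pyGetD room i "").toList.take room.length),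
           result.2))
        _ ?_]
    · rw [foldl_range_getD room ""
          (fun (result : Int × Int) r =>
            (result.1 + freeRuns (r.toList.take room.length), result.2))
          room.length (le_refl _)]
      rw [List.take_length,
          pair_foldl_fst room (fun a r => a + freeRuns (r.toList.take room.length)) 0 0,
          PySem.List.foldl_add]
      simp
    · intro acc i hi
      obtain ⟨h0, h1⟩ := PySem.List.mem_pyRange_one.mp hi
      obtain ⟨k, rfl⟩ : ∃ k : Nat, i = (k : Int) := ⟨i.toNat, (Int.toNat_of_nonneg h0).symm⟩
      have hk : k < room.length := by exact_mod_cast h1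
      show (let p := (PySem.List.pyRange 0 (room.length : Int) 1).foldl
              (fun (p : Int × Int) j =>
                stepA p (PySem.List.pyGetD (PySem.List.pyGetD room (k : Int) "").toList j ' '))
              (acc.1, 0)
            (p.1 + (if p.2 ≥ 2 then 1 else 0), acc.2)) = _
      rw [PySem.List.pyGetD_natCast,
          foldl_range_getD ((room.getD k "").toList) ' ' stepA room.length (hrowlen k hk)]
      have := line_eq ((room.getD k "").toList.take room.length) acc.1
      simp only at this ⊢
      rw [this, PySem.List.pyGetD_natCast]
  -- the column pass of A
  have hcol : ∀ (a b : Int),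
      (PySem.List.pyRange 0 (room.length : Int) 1).foldl (fun (result : Int × Int) j =>
        let p :=
          (PySem.List.pyRange 0 (room.length : Int) 1).foldl (fun (p : Int × Int) i =>
            if PySem.List.pyGetD (PySem.List.pyGetD room i "").toList j ' ' == 'X' then
              (p.1 + (if p.2 ≥ 2 then 1 else 0), 0)
            else
              (p.1, p.2 + 1)) (result.2, 0)
        (result.1, p.1 + (if p.2 ≥ 2 then 1 else 0))) (a, b)
      = (a, b + ((List.range room.length).map (fun k : Nat =>
            freeRuns (room.map (fun r => PySem.List.pyGetD r.toList (k : Int) ' ')))).sum) := by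
    intro a b
    rw [PySem.List.foldl_congr_mem _ _
        (fun (result : Int × Int) j =>
          (result.1,
           result.2 + freeRuns (room.map (fun r => PySem.List.pyGetD r.toList j ' '))))
        _ ?_]
    · rw [pair_foldl_snd _ (fun v j => v + freeRuns (room.map (fun r => PySem.List.pyGetD r.toList j ' '))) a b,
          PySem.List.foldl_add]
      rw [PySem.List.pyRange_zero_natCast, List.map_map]
      rfl
    · intro acc j hj
      obtain ⟨h0, h1⟩ := PySem.List.mem_pyRange_one.mp hj
      obtain ⟨k, rfl⟩ : ∃ k : Nat, j = (k : Int) := ⟨j.toNat, (Int.toNat_of_nonneg h0).symm⟩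
      show (let p := (PySem.List.pyRange 0 (room.length : Int) 1).foldl
              (fun (p : Int × Int) i =>
                stepA p (PySem.List.pyGetD (PySem.List.pyGetD room i "").toList (k : Int) ' '))
              (acc.2, 0)
            (acc.1, p.1 + (if p.2 ≥ 2 then 1 else 0))) = _
      rw [foldl_range_getD room ""
          (fun (p : Int × Int) r => stepA p (PySem.List.pyGetD r.toList (k : Int) ' '))
          room.length (le_refl _), List.take_length, ← List.foldl_map]
      have := line_eq (room.map (fun r => PySem.List.pyGetD r.toList (k : Int) ' ')) acc.2
      simp only at this ⊢
      rw [this]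
  -- columns of the truncated grid agree with columns of the full rows
  have hcolfix : ∀ k : Nat, k < room.length →
      room.map (fun r => PySem.List.pyGetD (r.toList.take room.length) (k : Int) ' ')
        = room.map (fun r => PySem.List.pyGetD r.toList (k : Int) ' ') := by
    intro k hk
    refine List.map_congr_left (fun r hr => ?_)
    rw [PySem.List.pyGetD_natCast, PySem.List.pyGetD_natCast, getD_take _ _ _ _ hk]
  -- assemble
  show (let n : Int := room.length
        let result : Int × Int := (0, 0)
        let result :=
          (PySem.List.pyRange 0 n 1).foldl (fun result i =>
            let p :=
              (PySem.List.pyRange 0 n 1).foldl (fun (p : Int × Int) j =>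
                if PySem.List.pyGetD (PySem.List.pyGetD room i "").toList j ' ' == 'X' then
                  (p.1 + (if p.2 ≥ 2 then 1 else 0), 0)
                else
                  (p.1, p.2 + 1)) (result.1, 0)
            (p.1 + (if p.2 ≥ 2 then 1 else 0), result.2)) result
        let result :=
          (PySem.List.pyRange 0 n 1).foldl (fun result j =>
            let p :=
              (PySem.List.pyRange 0 n 1).foldl (fun (p : Int × Int) i =>
                if PySem.List.pyGetD (PySem.List.pyGetD room i "").toList j ' ' == 'X' then
                  (p.1 + (if p.2 ≥ 2 then 1 else 0), 0)
                else
                  (p.1, p.2 + 1)) (result.2, 0)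
            (result.1, p.1 + (if p.2 ≥ 2 then 1 else 0))) result
        PySem.Str.join " " [PySem.Int.toStr result.1, PySem.Int.toStr result.2]) = _
  simp only
  rw [hrow, hcol]
  show PySem.Str.join " " [PySem.Int.toStr _, PySem.Int.toStr _] = _
  rw [PySem.Str.join]
  unfold solve_alt
  simp only [List.map_map]
  apply congrArg
  rw [show (" " : String).toList = [' '] from rfl]
  simp only [PySem.Int.toStr, String.toList_ofList, List.map_cons, List.map_nil,
    PySem.Chars.join_cons_cons, PySem.Chars.join_singleton]
  have hsum :
      ((List.range room.length).map (fun j : Nat =>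
          freeRuns (room.map (fun r => PySem.List.pyGetD (r.toList.take room.length) (j : Int) ' ')))).sum
        = ((List.range room.length).map (fun k : Nat =>
          freeRuns (room.map (fun r => PySem.List.pyGetD r.toList (k : Int) ' ')))).sum := by
    refine congrArg List.sum (List.map_congr_left (fun k hk => ?_))
    rw [hcolfix k (List.mem_range.mp hk)]
  simp only [Function.comp_def]
  rw [hsum, zero_add]
  simp

-- ===== VERDICT (by name: the statement is the Claim_ definition above) =====
theorem solve_spec : Claim_equal_solve := by
  intro room _ hpre
  unfold Spec_solve
  exact solve_eq_alt room hpre
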